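-- pv_equiv track=rewrite | github.com/quanghuy-ngo/honeypot_proj | honeypot_dynamic/temporal_generate.py | get_snapshot
-- ===== SOURCE A (Python) =====
-- def get_snapshot(auth_list, hassession_to_idx, end, hour_per_snapshot = 1):
--     current_time = 0
--     snapshot_list = []
--     while(current_time < end):
--         hassession_list = [0 for i in range(len(hassession_to_idx))]
--         for i in range(len(auth_list)):
--             start_time = auth_list[i][0]
--             end_time = auth_list[i][1]
--             user = auth_list[i][2]
--             comp = auth_list[i][3]
--             if current_time > start_time and current_time < end_time:
--                 hassession_list[hassession_to_idx[(comp, user)]] = 1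
--         snapshot_list.append(hassession_list)
--         current_time += hour_per_snapshot*60*60
--     return snapshot_list
-- ===== SOURCE B (Python) =====
-- def get_snapshot(auth_list, hassession_to_idx, end, hour_per_snapshot = 1):
--     # Interval-stamping: one zero-initialised grid, then for each auth mark the
--     # contiguous range of snapshot indices it covers directly.
--     if end <= 0:
--         return []
--     step = hour_per_snapshot * 60 * 60
--     num_snapshots = -((-end) // step)
--     m = len(hassession_to_idx)
--     out = [[0] * m for _ in range(num_snapshots)]
--     for auth in auth_list:
--         start_time = auth[0]
--         end_time = auth[1]
--         user = auth[2]
--         comp = auth[3]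
--         lo = max(0, start_time // step + 1)
--         hi = min(num_snapshots - 1, (end_time - 1) // step)
--         if lo <= hi:
--             idx = hassession_to_idx[(comp, user)]
--             for si in range(lo, hi + 1):
--                 out[si][idx] = 1
--     return out
-- ===== Notes on version B (the rewrite author's own statement) =====
-- stated objective: alternative
-- what changed: Instead of rebuilding every snapshot by rescanning the whole auth list (a condition check per snapshot per auth), B zero-initialises the S x M grid once and, for each auth, computes by floor division the contiguous range of snapshot indices it covers and stamps those cells directly; it skips the dict lookup for auths covering no snapshot, exactly as A's guarded lookup does.
import Mathlib
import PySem

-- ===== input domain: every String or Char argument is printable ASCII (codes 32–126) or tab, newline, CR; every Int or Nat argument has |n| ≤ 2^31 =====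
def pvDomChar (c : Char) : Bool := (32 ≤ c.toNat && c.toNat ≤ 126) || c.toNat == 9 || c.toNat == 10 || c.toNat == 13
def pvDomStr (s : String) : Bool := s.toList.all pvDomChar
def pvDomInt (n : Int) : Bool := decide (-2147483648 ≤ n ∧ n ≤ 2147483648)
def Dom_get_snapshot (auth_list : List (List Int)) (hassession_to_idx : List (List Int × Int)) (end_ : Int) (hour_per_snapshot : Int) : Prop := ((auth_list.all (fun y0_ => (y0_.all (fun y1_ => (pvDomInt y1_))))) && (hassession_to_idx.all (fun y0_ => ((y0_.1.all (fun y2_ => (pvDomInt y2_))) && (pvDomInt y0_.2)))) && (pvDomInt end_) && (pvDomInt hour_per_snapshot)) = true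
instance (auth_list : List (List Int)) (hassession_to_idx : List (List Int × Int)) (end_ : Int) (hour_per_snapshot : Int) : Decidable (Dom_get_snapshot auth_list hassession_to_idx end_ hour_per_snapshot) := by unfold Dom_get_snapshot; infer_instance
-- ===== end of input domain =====

-- B replaces A's per-snapshot rescan of all auths by one zero-initialised grid plus a direct
-- interval stamp per auth (a different algorithm of similar measured cost).

-- shared Python-primitive helper: dict[(comp,user)] as first-match lookup (total form; Pre_ makes the key present where it is used)
def pvDictGetD (d : List (List Int × Int)) (k : List Int) : Int :=
  ((PySem.Dict.mk d).get? k).getD 0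

-- ===== PORT A =====
-- one snapshot: hassession_list built by the inner 'for i in range(len(auth_list))'
def pvSnapA (auth_list : List (List Int)) (d : List (List Int × Int)) (t : Int) : List Int :=
  auth_list.foldl (fun hassession_list row =>
    let start_time := PySem.List.pyGetD row 0 0
    let end_time := PySem.List.pyGetD row 1 0
    let user := PySem.List.pyGetD row 2 0
    let comp := PySem.List.pyGetD row 3 0
    if t > start_time ∧ t < end_time then
      PySem.List.pySetD hassession_list (pvDictGetD d [comp, user]) 1
    else hassession_list) (List.replicate d.length 0)

-- the 'while current_time < end' loop, fuel-guarded (fuel only makes it total; inside Pre_ it never runs out)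
def pvLoopA (auth_list : List (List Int)) (d : List (List Int × Int)) (end_ step : Int) : Nat → Int → List (List Int) → List (List Int)
  | 0, _, acc => acc.reverse
  | fuel+1, t, acc =>
      if t < end_ then pvLoopA auth_list d end_ step fuel (t + step) (pvSnapA auth_list d t :: acc)
      else acc.reverse

def get_snapshot (auth_list : List (List Int)) (hassession_to_idx : List (List Int × Int)) (end_ : Int) (hour_per_snapshot : Int) : List (List Int) :=
  pvLoopA auth_list hassession_to_idx end_ (hour_per_snapshot * 60 * 60) (end_.toNat + 1) 0 []

-- ===== PORT B =====
-- 'for si in range(lo, hi+1): out[si][idx] = 1'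
def pvStamp (out : List (List Int)) (lo hi idx : Int) : List (List Int) :=
  (PySem.List.pyRange lo (hi + 1) 1).foldl
    (fun o si => o.modify si.toNat (fun r => PySem.List.pySetD r idx 1)) out

def get_snapshot_alt (auth_list : List (List Int)) (hassession_to_idx : List (List Int × Int)) (end_ : Int) (hour_per_snapshot : Int) : List (List Int) :=
  if end_ ≤ 0 then []
  else
    let step := hour_per_snapshot * 60 * 60
    let num_snapshots := -(PySem.Int.floordiv (-end_) step)
    let m := hassession_to_idx.length
    auth_list.foldl (fun out auth =>
      let start_time := PySem.List.pyGetD auth 0 0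
      let end_time := PySem.List.pyGetD auth 1 0
      let user := PySem.List.pyGetD auth 2 0
      let comp := PySem.List.pyGetD auth 3 0
      let lo := max 0 (PySem.Int.floordiv start_time step + 1)
      let hi := min (num_snapshots - 1) (PySem.Int.floordiv (end_time - 1) step)
      if lo ≤ hi then pvStamp out lo hi (pvDictGetD hassession_to_idx [comp, user]) else out)
      (List.replicate num_snapshots.toNat (List.replicate m 0))

-- ===== PRECONDITION & SPEC =====
-- true iff the auth covers some snapshot time (exactly when A performs the dict lookup)
def pvCovered (row : List Int) (end_ step : Int) : Bool :=
  decide (max 0 (PySem.Int.floordiv (PySem.List.pyGetD row 0 0) step + 1)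
    ≤ min (-(PySem.Int.floordiv (-end_) step) - 1) (PySem.Int.floordiv (PySem.List.pyGetD row 1 0 - 1) step))

-- true iff (comp,user) is a key and its index is a valid Python index into the snapshot row
def pvValidIdx (d : List (List Int × Int)) (row : List Int) : Bool :=
  match (PySem.Dict.mk d).get? [PySem.List.pyGetD row 3 0, PySem.List.pyGetD row 2 0] with
  | some idx => decide (-(d.length : Int) ≤ idx ∧ idx < (d.length : Int))
  | none => false

-- Pre_ = exactly the inputs where Python A returns: when end_ > 0 the while loop must advance
-- (hour_per_snapshot ≥ 1), every row must have the four fields, and every row that is active at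
-- some snapshot time must have a (comp,user) key whose index the assignment accepts.
def Pre_get_snapshot (auth_list : List (List Int)) (hassession_to_idx : List (List Int × Int)) (end_ : Int) (hour_per_snapshot : Int) : Prop :=
  0 < end_ → (1 ≤ hour_per_snapshot ∧
    ∀ row ∈ auth_list, 4 ≤ row.length ∧
      (pvCovered row end_ (hour_per_snapshot * 60 * 60) = true → pvValidIdx hassession_to_idx row = true))
instance (auth_list : List (List Int)) (hassession_to_idx : List (List Int × Int)) (end_ : Int) (hour_per_snapshot : Int) : Decidable (Pre_get_snapshot auth_list hassession_to_idx end_ hour_per_snapshot) := by unfold Pre_get_snapshot; infer_instance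

def pvWitness_get_snapshot : List (List Int) × (List (List Int × Int)) × Int × Int :=
  ([[0, 7200, 5, 9]], [([9, 5], 0)], 7200, 1)

def Spec_get_snapshot (auth_list : List (List Int)) (hassession_to_idx : List (List Int × Int)) (end_ : Int) (hour_per_snapshot : Int) (out : List (List Int)) : Prop := out = get_snapshot_alt auth_list hassession_to_idx end_ hour_per_snapshot
instance (auth_list : List (List Int)) (hassession_to_idx : List (List Int × Int)) (end_ : Int) (hour_per_snapshot : Int) (out : List (List Int)) : Decidable (Spec_get_snapshot auth_list hassession_to_idx end_ hour_per_snapshot out) := by unfold Spec_get_snapshot; infer_instance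

-- ===== CLAIM (what is proved, stated in full; the proofs are below) =====
def Claim_equal_get_snapshot : Prop := ∀ (auth_list : List (List Int)) (hassession_to_idx : List (List Int × Int)) (end_ : Int) (hour_per_snapshot : Int), Dom_get_snapshot auth_list hassession_to_idx end_ hour_per_snapshot → Pre_get_snapshot auth_list hassession_to_idx end_ hour_per_snapshot → Spec_get_snapshot auth_list hassession_to_idx end_ hour_per_snapshot (get_snapshot auth_list hassession_to_idx end_ hour_per_snapshot)

-- ===== LEMMAS AND PROOFS =====

theorem pvLoopA_run (auth_list : List (List Int)) (d : List (List Int × Int)) (end_ step : Int) :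
    ∀ (n fuel : Nat) (t : Int) (acc : List (List Int)), n ≤ fuel →
      end_ ≤ t + n * step → (∀ i : Nat, i < n → t + i * step < end_) →
      pvLoopA auth_list d end_ step fuel t acc
        = acc.reverse ++ (List.range n).map (fun i : Nat => pvSnapA auth_list d (t + (i : Int) * step)) := by
  intro n
  induction n with
  | zero =>
      intro fuel t acc _ hend _
      have hnot : ¬ t < end_ := by simpa using hend
      cases fuel with
      | zero => simp [pvLoopA]
      | succ f => simp [pvLoopA, hnot]
  | succ n ih =>
      intro fuel t acc hfuel hend hlt
      cases fuel with
      | zero => omega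
      | succ f =>
          have h0 : t < end_ := by
            have := hlt 0 (by omega); simpa using this
          have hstep1 : pvLoopA auth_list d end_ step (f+1) t acc
              = pvLoopA auth_list d end_ step f (t + step) (pvSnapA auth_list d t :: acc) := by
            simp [pvLoopA, h0]
          rw [hstep1, ih f (t + step) (pvSnapA auth_list d t :: acc) (by omega)
            (by push_cast at hend ⊢; linarith)
            (by intro i hi; have := hlt (i+1) (by omega); push_cast at this ⊢; linarith)]
          rw [List.range_succ_eq_map, List.reverse_cons, List.append_assoc]
          have hmap : (List.range n).map (fun i : Nat => pvSnapA auth_list d (t + step + (i:Int) * step))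
              = ((List.range n).map Nat.succ).map (fun i : Nat => pvSnapA auth_list d (t + (i:Int) * step)) := by
            rw [List.map_map]
            refine List.map_congr_left ?_
            intro a _
            show pvSnapA auth_list d (t + step + (a:Int) * step) = pvSnapA auth_list d (t + ((a+1 : Nat):Int) * step)
            have harg : t + step + (a : Int) * step = t + ((a+1 : Nat) : Int) * step := by push_cast; ring
            rw [harg]
          rw [hmap]
          simp
theorem pvStamp_eq_mapIdx (lo hi idx : Int) (hlo : 0 ≤ lo) :
    ∀ (g : List (List Int)), hi < (g.length : Int) →
    pvStamp g lo hi idx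
      = g.mapIdx (fun si r => if lo ≤ (si : Int) ∧ (si : Int) ≤ hi then PySem.List.pySetD r idx 1 else r) := by
  by_cases hle : lo ≤ hi
  case neg =>
    intro g _
    unfold pvStamp
    rw [PySem.List.pyRange_one_eq_nil (by omega)]
    simp only [List.foldl_nil]
    apply List.ext_getElem (by simp)
    intro j h1 h2
    rw [List.getElem_mapIdx]
    rw [if_neg (by omega)]
  case pos =>
    -- induction on the length of the range
    have key : ∀ (k : Nat), ∀ (lo : Int), 0 ≤ lo → (hi + 1 - lo).toNat = k →
        ∀ (g : List (List Int)), hi < (g.length : Int) →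
        pvStamp g lo hi idx
          = g.mapIdx (fun si r => if lo ≤ (si : Int) ∧ (si : Int) ≤ hi then PySem.List.pySetD r idx 1 else r) := by
      intro k
      induction k with
      | zero =>
          intro lo hlo hk g hg
          unfold pvStamp
          rw [PySem.List.pyRange_one_eq_nil (by omega)]
          simp only [List.foldl_nil]
          apply List.ext_getElem (by simp)
          intro j h1 h2
          rw [List.getElem_mapIdx, if_neg (by omega)]
      | succ k ih =>
          intro lo hlo hk g hg
          have hlt : lo < hi + 1 := by omega
          unfold pvStamp
          rw [PySem.List.pyRange_one_cons hlt]
          simp only [List.foldl_cons]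
          have := ih (lo + 1) (by omega) (by omega)
            (g.modify lo.toNat (fun r => PySem.List.pySetD r idx 1)) (by simpa using hg)
          unfold pvStamp at this
          rw [this]
          apply List.ext_getElem (by simp)
          intro j h1 h2
          rw [List.getElem_mapIdx, List.getElem_mapIdx, List.getElem_modify]
          by_cases hj : lo.toNat = j
          · have hjo : (j : Int) = lo := by omega
            rw [if_pos hj, if_neg (show ¬(lo + 1 ≤ (j : Int) ∧ (j : Int) ≤ hi) by omega),
              if_pos (show lo ≤ (j : Int) ∧ (j : Int) ≤ hi by omega)]
          · have hjo : (j : Int) ≠ lo := by omega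
            rw [if_neg hj]
            by_cases hc : lo + 1 ≤ (j : Int) ∧ (j : Int) ≤ hi
            · rw [if_pos hc, if_pos (by omega)]
            · rw [if_neg hc, if_neg (by omega)]
    intro g hg
    exact key (hi + 1 - lo).toNat lo hlo rfl g hg

def pvAStep (d : List (List Int × Int)) (t : Int) (hl : List Int) (row : List Int) : List Int :=
  if t > PySem.List.pyGetD row 0 0 ∧ t < PySem.List.pyGetD row 1 0 then
    PySem.List.pySetD hl (pvDictGetD d [PySem.List.pyGetD row 3 0, PySem.List.pyGetD row 2 0]) 1
  else hl

theorem pvRange_cond (step : Int) (hstep : 0 < step) (S st et si : Int)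
    (h0 : 0 ≤ si) (h1 : si ≤ S - 1) :
    (max 0 (PySem.Int.floordiv st step + 1) ≤ si ∧ si ≤ min (S - 1) (PySem.Int.floordiv (et - 1) step))
      ↔ (st < si * step ∧ si * step < et) := by
  have ha := PySem.Int.le_floordiv_iff_mul_le (a := st) (b := step) (q := si) hstep
  have hb := PySem.Int.le_floordiv_iff_mul_le (a := et - 1) (b := step) (q := si) hstep
  generalize si * step = m at ha hb ⊢
  omega

theorem pvBStep_eq (d : List (List Int × Int)) (step : Int) (hstep : 0 < step)
    (S : Int) (g : List (List Int)) (hg : (g.length : Int) = S) (row : List Int) :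
    (let start_time := PySem.List.pyGetD row 0 0
     let end_time := PySem.List.pyGetD row 1 0
     let lo := max 0 (PySem.Int.floordiv start_time step + 1)
     let hi := min (S - 1) (PySem.Int.floordiv (end_time - 1) step)
     if lo ≤ hi then pvStamp g lo hi (pvDictGetD d [PySem.List.pyGetD row 3 0, PySem.List.pyGetD row 2 0]) else g)
      = g.mapIdx (fun si r => pvAStep d ((si : Int) * step) r row) := by
  simp only []
  set st := PySem.List.pyGetD row 0 0 with hst
  set et := PySem.List.pyGetD row 1 0 with het
  set lo := max 0 (PySem.Int.floordiv st step + 1) with hlo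
  set hi := min (S - 1) (PySem.Int.floordiv (et - 1) step) with hhi
  by_cases hle : lo ≤ hi
  · rw [if_pos hle, pvStamp_eq_mapIdx lo hi _ (by omega) g (by omega)]
    apply List.ext_getElem (by simp)
    intro j hj1 hj2
    rw [List.getElem_mapIdx, List.getElem_mapIdx]
    unfold pvAStep
    have hcond := pvRange_cond step hstep S st et (j : Int) (by omega)
      (by rw [List.length_mapIdx] at hj1; omega)
    by_cases hc : lo ≤ (j : Int) ∧ (j : Int) ≤ hi
    · rw [if_pos hc, if_pos (by rw [← hlo, ← hhi] at hcond; have := hcond.mp hc; exact ⟨this.1, this.2⟩)]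
    · rw [if_neg hc, if_neg (by rw [← hlo, ← hhi] at hcond; intro hx; exact hc (hcond.mpr ⟨hx.1, hx.2⟩))]
  · rw [if_neg hle]
    apply List.ext_getElem (by simp)
    intro j hj1 hj2
    rw [List.getElem_mapIdx]
    unfold pvAStep
    have hcond := pvRange_cond step hstep S st et (j : Int) (by omega) (by omega)
    rw [← hlo, ← hhi] at hcond
    have hfalse : ¬((j : Int) * step > st ∧ (j : Int) * step < et) := by
      intro hx
      have := hcond.mpr ⟨hx.1, hx.2⟩
      exact hle (le_trans this.1 this.2)
    rw [if_neg hfalse]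
theorem pvFoldB_eq (d : List (List Int × Int)) (step : Int) (hstep : 0 < step) (S : Int) :
    ∀ (rows : List (List Int)) (g : List (List Int)), (g.length : Int) = S →
      rows.foldl (fun out row =>
        let start_time := PySem.List.pyGetD row 0 0
        let end_time := PySem.List.pyGetD row 1 0
        let lo := max 0 (PySem.Int.floordiv start_time step + 1)
        let hi := min (S - 1) (PySem.Int.floordiv (end_time - 1) step)
        if lo ≤ hi then pvStamp out lo hi (pvDictGetD d [PySem.List.pyGetD row 3 0, PySem.List.pyGetD row 2 0]) else out) g
      = g.mapIdx (fun si r => rows.foldl (pvAStep d ((si : Int) * step)) r) := by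
  intro rows
  induction rows with
  | nil =>
      intro g hg
      simp only [List.foldl_nil]
      apply List.ext_getElem (by simp)
      intro j h1 h2
      rw [List.getElem_mapIdx]
  | cons row rest ih =>
      intro g hg
      simp only [List.foldl_cons]
      rw [pvBStep_eq d step hstep S g hg row]
      rw [ih (g.mapIdx (fun si r => pvAStep d ((si : Int) * step) r row)) (by rw [List.length_mapIdx]; exact hg)]
      apply List.ext_getElem (by simp)
      intro j h1 h2
      rw [List.getElem_mapIdx, List.getElem_mapIdx, List.getElem_mapIdx]
theorem pvSnapA_eq (auth_list : List (List Int)) (d : List (List Int × Int)) (t : Int) :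
    pvSnapA auth_list d t = auth_list.foldl (pvAStep d t) (List.replicate d.length 0) := by
  rfl

theorem final_spec (a : List (List Int)) (d : List (List Int × Int)) (end_ h : Int)
    (hpre : 0 < end_ → 1 ≤ h) :
    get_snapshot a d end_ h = get_snapshot_alt a d end_ h := by
  by_cases hend : end_ ≤ 0
  · unfold get_snapshot get_snapshot_alt
    rw [if_pos hend]
    simp [pvLoopA, show ¬ (0:Int) < end_ by omega]
  · have hh := hpre (by omega)
    set step := h * 60 * 60 with hstepdef
    have hstep : 0 < step := by omega
    set S := -(PySem.Int.floordiv (-end_) step) with hSdef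
    have hSb : (S - 1) * step < end_ ∧ end_ ≤ S * step :=
      (PySem.Int.neg_floordiv_neg_eq_iff_of_pos hstep).mp rfl
    have hS1 : 1 ≤ S := by
      by_contra hx
      have : S * step ≤ 0 := mul_nonpos_of_nonpos_of_nonneg (by omega) (by omega)
      omega
    have hScast : ((S.toNat : Int)) = S := Int.toNat_of_nonneg (by omega)
    have hSle : S ≤ end_ := by
      have : S - 1 ≤ (S - 1) * step := le_mul_of_one_le_right (by omega) (by omega)
      omega
    have hB : get_snapshot_alt a d end_ h
        = List.mapIdx (fun si r => a.foldl (pvAStep d ((si : Int) * step)) r)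
            (List.replicate S.toNat (List.replicate d.length 0)) := by
      unfold get_snapshot_alt
      rw [if_neg hend]
      exact pvFoldB_eq d step hstep S a _ (by rw [List.length_replicate]; exact hScast)
    have hA : get_snapshot a d end_ h
        = ([] : List (List Int)).reverse ++ (List.range S.toNat).map (fun i : Nat => pvSnapA a d (0 + (i : Int) * step)) := by
      unfold get_snapshot
      refine pvLoopA_run a d end_ step S.toNat (end_.toNat + 1) 0 [] (by omega) ?_ ?_
      · rw [hScast]; omega
      · intro i hi
        have hile : (i : Int) ≤ S - 1 := by omega
        have : (i : Int) * step ≤ (S - 1) * step := mul_le_mul_of_nonneg_right hile (by omega)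
        omega
    rw [hA, hB]
    apply List.ext_getElem (by simp)
    intro j h1 h2
    simp only [List.reverse_nil, List.nil_append] at *
    rw [List.getElem_map, List.getElem_mapIdx, List.getElem_replicate, List.getElem_range]
    rw [pvSnapA_eq]
    norm_num

-- ===== VERDICT (by name: the statement is the Claim_ definition above) =====
theorem get_snapshot_spec : Claim_equal_get_snapshot := by
  intro auth_list hassession_to_idx end_ hour_per_snapshot _ hpre
  unfold Spec_get_snapshot
  exact final_spec auth_list hassession_to_idx end_ hour_per_snapshot (fun h0 => (hpre h0).1)
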